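-- pv_equiv track=rewrite | github.com/denny0323/Algorithm_Study | Programmers/3_인사고과.py | solution
-- ===== SOURCE A (Python) =====
-- from itertools import groupby
--
-- def FindNoIncen(scores):
--     Incen = []
--     for i in range(len(scores)):
--         is_break = False
--         for j in range(len(scores)):
--             if scores[i][1][0] < scores[j][1][0] and scores[i][1][1] < scores[j][1][1]:
--                 is_break = True
--                 break
--         if not is_break:
--             Incen.append(scores[i])
--     return sorted(Incen, key=lambda x:x[0])
--
-- def solution(scores):
--     scores = [(i, score) for i, score in enumerate(scores)]
--     scores = FindNoIncen(scores)
--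
--     sorted_scres = sorted(scores, key=lambda x: -sum(x[1]))
--     ranks = []
--     rank = 1
--     for k, v in groupby(sorted_scres, lambda x: -sum(x[1])):
--         grp = [(rank, tup) for tup in v]
--         ranks += grp
--         rank += len(grp)
--
--     ranks.sort(key=lambda x: x[1][0])
--     if ranks[0][1][0] == 0:
--         return ranks[0][0]
--     else:
--         return -1
-- ===== SOURCE B (Python) =====
-- def solution(scores):
--     def dominated(p):
--         return any(q[0] > p[0] and q[1] > p[1] for q in scores)
--     first = scores[0]
--     if dominated(first):
--         return -1
--     target = sum(first)
--     return 1 + sum(1 for q in scores if sum(q) > target and not dominated(q))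
-- ===== Notes on version B (the rewrite author's own statement) =====
-- stated objective: simpler
-- what changed: B drops the enumerate/filter/two-sorts/groupby/re-sort pipeline: it directly tests whether the first employee is Pareto-dominated and, if not, returns 1 + the count of non-dominated employees with a strictly larger score sum, with no sorting or rank bookkeeping at all.
-- outside the precondition, e.g. on solution([[1, 1], [9, 9], [9]]): A returns -1, B returns -1
import Mathlib
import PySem

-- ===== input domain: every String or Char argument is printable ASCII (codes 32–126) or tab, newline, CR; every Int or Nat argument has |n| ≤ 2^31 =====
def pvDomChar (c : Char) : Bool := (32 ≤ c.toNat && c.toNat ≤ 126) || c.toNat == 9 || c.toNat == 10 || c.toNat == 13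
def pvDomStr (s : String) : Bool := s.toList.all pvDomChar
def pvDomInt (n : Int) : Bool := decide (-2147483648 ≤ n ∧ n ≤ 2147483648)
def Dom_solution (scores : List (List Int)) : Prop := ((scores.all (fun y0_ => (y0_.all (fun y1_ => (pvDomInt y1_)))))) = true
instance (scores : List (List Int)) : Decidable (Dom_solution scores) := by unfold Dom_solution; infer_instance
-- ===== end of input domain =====

-- B drops A's enumerate/filter/two-sorts/groupby/re-sort pipeline and directly counts
-- non-dominated entries with a larger sum; objective: simpler.

-- ===== PORT A =====
-- row[0] / row[1]; the .getD 0 fallback is only reached where Python raises IndexError (excluded by Pre_)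
def rowFst (r : List Int) : Int := (PySem.List.pyGet? r 0).getD 0
def rowSnd (r : List Int) : Int := (PySem.List.pyGet? r 1).getD 0

-- inner 'for j … break' loop of FindNoIncen: True iff some entry strictly dominates p
def findBreak (ss : List (Int × List Int)) (p : Int × List Int) : Bool :=
  ss.any (fun q => decide (rowFst p.2 < rowFst q.2) && decide (rowSnd p.2 < rowSnd q.2))

def FindNoIncen (ss : List (Int × List Int)) : List (Int × List Int) :=
  let incen := ss.foldl (fun acc p => if findBreak ss p then acc else acc ++ [p]) []
  PySem.List.sorted incen (fun x => x.1) false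

-- the 'for k, v in groupby(…)' loop: consecutive groups of equal key, each tagged with the running rank
def grpLoop (key : Int × List Int → Int) : List (Int × List Int) → Int → List (Int × (Int × List Int))
  | [], _ => []
  | x :: xs, rank =>
    let grp := x :: xs.takeWhile (fun y => key y == key x)
    let rest := xs.dropWhile (fun y => key y == key x)
    grp.map (fun t => (rank, t)) ++ grpLoop key rest (rank + (grp.length : Int))
termination_by l => l.length
decreasing_by
  have := List.length_dropWhile_le (fun y => key y == key x) xs
  simpa using Nat.lt_succ_of_le this

def solution (scores : List (List Int)) : Int :=
  let ss := PySem.List.enumerate scores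
  let ss2 := FindNoIncen ss
  let sorted_scres := PySem.List.sorted ss2 (fun x => -(x.2.sum)) false
  let ranks := grpLoop (fun x => -(x.2.sum)) sorted_scres 1
  let ranks2 := PySem.List.sorted ranks (fun x => x.2.1) false
  match ranks2 with
  | [] => 0   -- ranks[0] raises IndexError here (only for scores = []); excluded by Pre_
  | r :: _ => if r.2.1 == 0 then r.1 else -1

-- ===== PORT B =====
def dominatedIn (scores : List (List Int)) (p : List Int) : Bool :=
  scores.any (fun q => decide (rowFst p < rowFst q) && decide (rowSnd p < rowSnd q))

def solution_alt (scores : List (List Int)) : Int :=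
  let first := scores.headD []   -- scores[0]; default only reached where Python raises (excluded by Pre_)
  if dominatedIn scores first then -1
  else 1 + ((scores.filter (fun q => decide (first.sum < q.sum) && !dominatedIn scores q)).length : Int)

-- ===== PRECONDITION & SPEC =====
-- Pre_ excludes the inputs where Python A raises IndexError: the empty list (ranks[0]),
-- and rows too short for the comparisons A evaluates (row[0] always, row[1] whenever some
-- row has a strictly larger first entry); a few A-returning inputs where an inner-loop
-- break skips the raising comparison are also excluded (A = B on those too).
def Pre_solution (scores : List (List Int)) : Prop :=
  scores ≠ [] ∧ (∀ r ∈ scores, 1 ≤ r.length) ∧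
    ∀ p ∈ scores, ∀ q ∈ scores, rowFst p < rowFst q → 2 ≤ p.length ∧ 2 ≤ q.length
instance (scores : List (List Int)) : Decidable (Pre_solution scores) := by
  unfold Pre_solution; infer_instance

def pvWitness_solution : List (List Int) := [[1, 2], [3, 0]]

def Spec_solution (scores : List (List Int)) (out : Int) : Prop := out = solution_alt scores
instance (scores : List (List Int)) (out : Int) : Decidable (Spec_solution scores out) := by
  unfold Spec_solution; infer_instance

-- ===== CLAIM (what is proved, stated in full; the proofs are below) =====
def Claim_equal_solution : Prop := ∀ (scores : List (List Int)), Dom_solution scores → Pre_solution scores → Spec_solution scores (solution scores)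

-- ===== LEMMAS AND PROOFS =====

theorem findBreak_enumerate (scores : List (List Int)) (s : Int) (p : Int × List Int) :
    findBreak (PySem.List.enumerate scores s) p = dominatedIn scores p.2 := by
  unfold findBreak dominatedIn
  conv_rhs => rw [← PySem.List.map_snd_enumerate (xs := scores) (s := s)]
  rw [List.any_map]
  rfl

theorem grpLoop_spec (key : Int × List Int → Int) (l : List (Int × List Int))
    (hp : l.Pairwise (fun a b => key a ≤ key b)) (r : Int) :
    grpLoop key l r =
      l.map (fun e => (r + ((l.filter (fun x => decide (key x < key e))).length : Int), e)) := by
  induction hn : l.length using Nat.strong_induction_on generalizing l r with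
  | _ n ih =>
  match l, hp with
  | [], _ => simp [grpLoop]
  | x :: xs, hp =>
    have hhead : ∀ y ∈ xs, key x ≤ key y := (List.pairwise_cons.mp hp).1
    have hxs : xs.Pairwise (fun a b => key a ≤ key b) := (List.pairwise_cons.mp hp).2
    set p : Int × List Int → Bool := fun y => key y == key x with hpdef
    have hgrp_key : ∀ y ∈ x :: xs.takeWhile p, key y = key x := by
      intro y hy
      rcases List.mem_cons.mp hy with h | h
      · rw [h]
      · have := List.mem_takeWhile_imp h
        simpa [hpdef] using this
    have hl_ge : ∀ y ∈ x :: xs, key x ≤ key y := by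
      intro y hy
      rcases List.mem_cons.mp hy with h | h
      · rw [h]
      · exact hhead y h
    have hrest_pair : (xs.dropWhile p).Pairwise (fun a b => key a ≤ key b) :=
      hxs.sublist (List.dropWhile_sublist p)
    have hrest_gt : ∀ y ∈ xs.dropWhile p, key x < key y := by
      cases hr : xs.dropWhile p with
      | nil => intro y hy; simp at hy
      | cons h t =>
        have hh_mem : h ∈ xs := (List.dropWhile_sublist p).subset (by rw [hr]; exact List.mem_cons_self)
        have hph : p h = false := by
          have := List.head?_dropWhile_not p xs
          rw [hr] at this
          simpa using this
        have hxh : key x < key h := by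
          have hne : key h ≠ key x := by simpa [hpdef] using hph
          exact lt_of_le_of_ne (hhead h hh_mem) (Ne.symm hne)
        intro y hy
        rcases List.mem_cons.mp hy with h1 | h1
        · rw [h1]; exact hxh
        · have hp2 := hrest_pair
          rw [hr] at hp2
          exact lt_of_lt_of_le hxh ((List.pairwise_cons.mp hp2).1 y h1)
    have hsplit : x :: xs = (x :: xs.takeWhile p) ++ xs.dropWhile p := by
      have : List.takeWhile p (x :: xs) = x :: xs.takeWhile p := by
        simp [hpdef]
      conv_lhs => rw [← List.takeWhile_append_dropWhile (p := p) (l := x :: xs)]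
      rw [this]
      simp [hpdef]
    have hlen : (xs.dropWhile p).length < n := by
      have := List.length_dropWhile_le p xs
      simp at hn
      omega
    have hstep : grpLoop key (x :: xs) r =
        (x :: xs.takeWhile p).map (fun t => (r, t)) ++
          grpLoop key (xs.dropWhile p) (r + ((x :: xs.takeWhile p).length : Int)) := by
      rw [grpLoop]
    rw [hstep, ih _ hlen (xs.dropWhile p) hrest_pair _ rfl]
    conv_rhs => rw [hsplit, List.map_append]
    congr 1
    · apply List.map_congr_left
      intro e he
      have hfilter : (x :: xs).filter (fun y => decide (key y < key e)) = [] := by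
        apply List.filter_eq_nil_iff.mpr
        intro a ha
        have h1 : key x ≤ key a := hl_ge a ha
        have h2 : key e = key x := hgrp_key e he
        simp only [decide_eq_true_eq]
        omega
      rw [← hsplit, hfilter]
      simp
    · apply List.map_congr_left
      intro e he
      rw [← hsplit]
      have hke : key x < key e := hrest_gt e he
      have hfl : (x :: xs).filter (fun y => decide (key y < key e)) =
          ((x :: xs.takeWhile p).filter (fun y => decide (key y < key e))) ++
            ((xs.dropWhile p).filter (fun y => decide (key y < key e))) := by
        conv_lhs => rw [hsplit]
        exact List.filter_append _ _
      have hgrpfull : (x :: xs.takeWhile p).filter (fun y => decide (key y < key e)) =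
          x :: xs.takeWhile p := by
        apply List.filter_eq_self.mpr
        intro a ha
        have : key a = key x := hgrp_key a ha
        simp only [decide_eq_true_eq]
        omega
      rw [hfl, hgrpfull]
      simp only [List.length_append]
      push_cast
      ring_nf

theorem length_filter_enumerate (xs : List (List Int)) (s : Int) (g : List Int → Bool) :
    ((PySem.List.enumerate xs s).filter (fun p => g p.2)).length = (xs.filter g).length := by
  rw [← List.countP_eq_length_filter, ← List.countP_eq_length_filter]
  conv_rhs => rw [← PySem.List.map_snd_enumerate (xs := xs) (s := s)]
  rw [List.countP_map]
  rfl

theorem solution_spec_aux : ∀ (scores : List (List Int)), Pre_solution scores →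
    solution scores = solution_alt scores := by
  intro scores hpre
  obtain ⟨a, rest, rfl⟩ := List.exists_cons_of_ne_nil hpre.1
  -- abbreviations
  set E := PySem.List.enumerate (a :: rest) 0 with hE
  set F := E.filter (fun p => !dominatedIn (a :: rest) p.2) with hF
  -- step 1: FindNoIncen
  have hfun : (fun (acc : List (Int × List Int)) p => if findBreak E p then acc else acc ++ [p])
      = fun acc p => if (!findBreak E p) then acc ++ [p] else acc := by
    funext acc p; by_cases h : findBreak E p <;> simp [h]
  have hfold : (E.foldl (fun acc p => if findBreak E p then acc else acc ++ [p]) []) = F := by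
    rw [hfun, PySem.List.foldl_append_if_eq_filter]
    simp only [List.nil_append]
    apply List.filter_congr
    intro p hp
    rw [findBreak_enumerate]
  have hFpair1 : F.Pairwise (fun p q => p.1 < q.1) :=
    (PySem.List.pairwise_lt_enumerate (xs := a :: rest) (s := 0)).filter _
  have hFind : FindNoIncen E = F := by
    show PySem.List.sorted (E.foldl (fun acc p => if findBreak E p then acc else acc ++ [p]) [])
      (fun x => x.1) false = F
    rw [hfold]
    exact PySem.List.sorted_eq_of_perm_of_pairwise_lt _ _ _ (List.Perm.refl F) hFpair1
  -- step 2: the sum-sort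
  set S := PySem.List.sorted F (fun x : Int × List Int => -(x.2.sum)) false with hS
  have hSperm : S.Perm F := PySem.List.sorted_perm ..
  have hSpair : S.Pairwise (fun a b => (fun x : Int × List Int => -(x.2.sum)) a ≤
      (fun x : Int × List Int => -(x.2.sum)) b) := PySem.List.sorted_pairwise ..
  -- step 3: the groupby-rank loop
  set fF : Int × List Int → Int × (Int × List Int) := fun e =>
    (1 + ((F.filter (fun x => decide (-(x.2.sum) < -(e.2.sum)))).length : Int), e) with hfF
  have hranks : grpLoop (fun x : Int × List Int => -(x.2.sum)) S 1 = S.map fF := by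
    rw [grpLoop_spec _ S hSpair 1, hfF]
    apply List.map_congr_left
    intro e he
    simp only [← List.countP_eq_length_filter]
    rw [hSperm.countP_eq]
  have hranksperm : (F.map fF).Perm (grpLoop (fun x : Int × List Int => -(x.2.sum)) S 1) := by
    rw [hranks]; exact (hSperm.map fF).symm
  have hl'pair : (F.map fF).Pairwise (fun x y => x.2.1 < y.2.1) := by
    rw [List.pairwise_map]
    exact hFpair1.imp (by intro p q h; simpa [hfF] using h)
  have hsorted2 : PySem.List.sorted (grpLoop (fun x : Int × List Int => -(x.2.sum)) S 1)
      (fun x => x.2.1) false = F.map fF :=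
    PySem.List.sorted_eq_of_perm_of_pairwise_lt _ _ _ hranksperm hl'pair
  have hA : solution (a :: rest) = (match F.map fF with
      | [] => (0 : Int)
      | r :: _ => if r.2.1 == 0 then r.1 else -1) := by
    show (match PySem.List.sorted (grpLoop (fun x : Int × List Int => -(x.2.sum))
        (PySem.List.sorted (FindNoIncen E) (fun x : Int × List Int => -(x.2.sum)) false) 1)
        (fun x => x.2.1) false with
      | [] => (0 : Int)
      | r :: _ => if r.2.1 == 0 then r.1 else -1) = _
    rw [hFind, ← hS, hsorted2]
  by_cases hdom : dominatedIn (a :: rest) a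
  case neg =>
    -- first employee survives; A returns its rank, B counts larger sums among survivors
    have hEcons : E = (0, a) :: PySem.List.enumerate rest 1 := by
      rw [hE, PySem.List.enumerate_cons]
      norm_num
    have hFcons : F = (0, a) :: (PySem.List.enumerate rest 1).filter
        (fun p => !dominatedIn (a :: rest) p.2) := by
      rw [hF, hEcons, List.filter_cons]
      simp [hdom]
    have hcount : (F.filter (fun x : Int × List Int => decide (-(x.2.sum) < -(a.sum)))).length
        = ((a :: rest).filter (fun q => decide (a.sum < q.sum) && !dominatedIn (a :: rest) q)).length := by
      rw [hF, List.filter_filter]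
      have hpred : (fun p : Int × List Int => decide (-(p.2.sum) < -(a.sum)) && !dominatedIn (a :: rest) p.2)
          = fun p : Int × List Int => (fun q => decide (a.sum < q.sum) && !dominatedIn (a :: rest) q) p.2 := by
        funext p
        simp only []
        congr 1
        rw [decide_eq_decide]
        omega
      rw [hpred, hE, length_filter_enumerate (a :: rest) 0
        (fun q => decide (a.sum < q.sum) && !dominatedIn (a :: rest) q)]
    have hA2 : solution (a :: rest)
        = 1 + ((F.filter (fun x : Int × List Int => decide (-(x.2.sum) < -(a.sum)))).length : Int) := by
      rw [hA]
      conv_lhs => rw [hFcons]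
      rfl
    rw [hA2, hcount]
    show _ = (if dominatedIn (a :: rest) a then (-1 : Int)
      else 1 + (((a :: rest).filter (fun q => decide (a.sum < q.sum)
        && !dominatedIn (a :: rest) q)).length : Int))
    rw [if_neg hdom]
  case pos =>
    -- first employee is dominated: the least surviving index is ≥ 1 and A returns -1, as does B
    have hEcons : E = (0, a) :: PySem.List.enumerate rest 1 := by
      rw [hE, PySem.List.enumerate_cons]
      norm_num
    have hFtail : F = (PySem.List.enumerate rest 1).filter
        (fun p => !dominatedIn (a :: rest) p.2) := by
      rw [hF, hEcons, List.filter_cons]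
      simp [hdom]
    -- F is nonempty: a maximal-first-score entry is never dominated
    obtain ⟨m, hm⟩ : ∃ m, PySem.List.max? E (fun p : Int × List Int => rowFst p.2) = some m := by
      cases h : PySem.List.max? E (fun p : Int × List Int => rowFst p.2) with
      | none =>
        exfalso
        have := (PySem.List.max?_eq_none_iff _ _).mp h
        rw [hEcons] at this
        simp at this
      | some m => exact ⟨m, rfl⟩
    have hmmem : m ∈ E := PySem.List.max?_mem hm
    have hmax : ∀ y ∈ E, rowFst y.2 ≤ rowFst m.2 := PySem.List.max?_isMax hm
    have hmnd : dominatedIn (a :: rest) m.2 = false := by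
      unfold dominatedIn
      rw [List.any_eq_false]
      intro q hq
      have hq' : ∃ p ∈ E, p.2 = q := by
        have hmem2 : q ∈ E.map (fun p => p.2) := by
          rw [hE, PySem.List.map_snd_enumerate]
          exact hq
        obtain ⟨p, hp1, hp2⟩ := List.mem_map.mp hmem2
        exact ⟨p, hp1, hp2⟩
      obtain ⟨p, hpE, rfl⟩ := hq'
      have := hmax p hpE
      simp only [Bool.and_eq_true, decide_eq_true_eq, not_and]
      omega
    have hmF : m ∈ F := by
      rw [hF]
      exact List.mem_filter.mpr ⟨hmmem, by simp [hmnd]⟩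
    obtain ⟨h0, t0, hFc⟩ := List.exists_cons_of_ne_nil (List.ne_nil_of_mem hmF)
    have hh0 : h0 ∈ (PySem.List.enumerate rest 1) := by
      have hmem3 : h0 ∈ F := by rw [hFc]; exact List.mem_cons_self
      rw [hFtail] at hmem3
      exact (List.mem_filter.mp hmem3).1
    have hh0idx : h0.1 ≠ 0 := by
      obtain ⟨k, hk, hkeq⟩ := (PySem.List.mem_enumerate_iff _ _ _).mp hh0
      rw [hkeq]
      simp only []
      omega
    rw [hA, hFc]
    show (if (h0.1 == 0) = true then (fF h0).1 else (-1 : Int)) = solution_alt (a :: rest)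
    rw [if_neg (by simpa using hh0idx)]
    show (-1 : Int) = (if dominatedIn (a :: rest) a then (-1 : Int)
      else 1 + (((a :: rest).filter (fun q => decide (a.sum < q.sum)
        && !dominatedIn (a :: rest) q)).length : Int))
    rw [if_pos hdom]

-- ===== VERDICT (by name: the statement is the Claim_ definition above) =====
theorem solution_spec : Claim_equal_solution := by
  intro scores _ hpre
  exact solution_spec_aux scores hpre
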